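-- pv_equiv track=rewrite | github.com/dominicplouffe/mongodbsearch | stemmer.py | __ResolveY
-- ===== SOURCE A (Python) =====
-- Vowels = ['a', 'e', 'i', 'o', 'u', 'y']
--
-- def __ResolveY(Target):
--     if len(Target) == 0:
--         return Target
--
--     if Target[0] == 'y':
--         Target = 'Y' + Target[1:]
--
--     for i in range(len(Target) - 1):
--         if Vowels.__contains__(Target[i]) and Target[i+1] == 'y':
--             Target = Target[:i+1] + 'Y' + Target[i+2:]
--
--     return Target
-- ===== SOURCE B (Python) =====
-- # Single forward pass with a running "previous char was a vowel" flag
-- # (initialised True so a leading 'y' is capitalised), instead of A's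
-- # repeated slice-and-rebuild with a two-index look-ahead.
-- def __ResolveY(Target):
--     out = []
--     prev_is_vowel = True
--     for c in Target:
--         if c == 'y' and prev_is_vowel:
--             out.append('Y')
--             prev_is_vowel = False
--         else:
--             out.append(c)
--             prev_is_vowel = c in ('a', 'e', 'i', 'o', 'u', 'y')
--     return ''.join(out)
-- ===== Notes on version B (the rewrite author's own statement) =====
-- stated objective: simpler
-- what changed: A's loop repeatedly slices and rebuilds the whole string with a two-index look-ahead membership test; B makes one forward pass appending to a list while carrying a running prev-is-vowel boolean (initialised True so a leading 'y' is capitalised).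
import Mathlib
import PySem

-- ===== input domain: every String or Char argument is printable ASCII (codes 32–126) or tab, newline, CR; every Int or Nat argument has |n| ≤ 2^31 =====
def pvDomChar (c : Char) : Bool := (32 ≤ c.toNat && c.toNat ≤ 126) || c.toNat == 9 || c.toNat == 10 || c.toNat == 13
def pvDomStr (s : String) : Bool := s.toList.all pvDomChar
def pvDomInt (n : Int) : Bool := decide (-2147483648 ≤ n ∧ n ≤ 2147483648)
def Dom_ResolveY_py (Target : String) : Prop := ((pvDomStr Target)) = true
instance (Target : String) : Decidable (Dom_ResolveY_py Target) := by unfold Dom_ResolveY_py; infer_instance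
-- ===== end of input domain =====

-- B replaces A's repeated slice-and-rebuild look-ahead loop by a single pass
-- carrying a prev-is-vowel flag (objective: simpler).


-- the module constant Vowels = ['a', 'e', 'i', 'o', 'u', 'y']
def pyVowels : List Char := ['a', 'e', 'i', 'o', 'u', 'y']

-- ===== PORT A =====
-- body of A's for-loop: Target = Target[:i+1] + 'Y' + Target[i+2:] when
-- Vowels.__contains__(Target[i]) and Target[i+1] == 'y'
def resolveYStep (t : List Char) (i : Nat) : List Char :=
  if pyVowels.contains ((PySem.List.pyGet? t (i : Int)).getD '?')
      && (PySem.List.pyGet? t ((i : Int) + 1) == some 'y') then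
    PySem.List.slice t none (some ((i : Int) + 1)) ++ ['Y']
      ++ PySem.List.slice t (some ((i : Int) + 2)) none
  else t

def ResolveY_py (Target : String) : String :=
  let t := Target.toList
  if t.length = 0 then Target
  else
    -- if Target[0] == 'y': Target = 'Y' + Target[1:]
    let t1 := if PySem.List.pyGet? t (0 : Int) == some 'y'
              then ['Y'] ++ PySem.List.slice t (some 1) none else t
    -- for i in range(len(Target) - 1): …
    String.ofList ((List.range (t1.length - 1)).foldl resolveYStep t1)

-- ===== PORT B =====
def resolveYGo (flag : Bool) : List Char → List Char
  | [] => []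
  | c :: cs =>
    if c = 'y' ∧ flag then 'Y' :: resolveYGo false cs
    else c :: resolveYGo (pyVowels.contains c) cs

def ResolveY_py_alt (Target : String) : String :=
  String.ofList (resolveYGo true Target.toList)

-- ===== PRECONDITION & SPEC =====
def Spec_ResolveY_py (Target : String) (out : String) : Prop := out = ResolveY_py_alt Target
instance (Target : String) (out : String) : Decidable (Spec_ResolveY_py Target out) := by unfold Spec_ResolveY_py; infer_instance

-- ===== CLAIM (what is proved, stated in full; the proofs are below) =====
def Claim_equal_ResolveY_py : Prop := ∀ (Target : String), Dom_ResolveY_py Target → Spec_ResolveY_py Target (ResolveY_py Target)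

-- ===== LEMMAS AND PROOFS =====

-- A's pass fixes characters left to right: with the first |pre|+1 chars final
-- (last of them p), the remaining loop iterations rewrite suf exactly as B's
-- single pass does with flag = "p is a vowel".
theorem resolveY_loop (suf : List Char) : ∀ (pre : List Char) (p : Char),
    (List.range' pre.length suf.length).foldl resolveYStep (pre ++ p :: suf)
      = pre ++ p :: resolveYGo (pyVowels.contains p) suf := by
  induction suf with
  | nil => intro pre p; simp [resolveYGo]
  | cons c cs ih =>
    intro pre p
    rw [List.length_cons, List.range'_succ, List.foldl_cons]
    have hg0 : PySem.List.pyGet? (pre ++ p :: c :: cs) (pre.length : Int) = some p := by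
      rw [PySem.List.pyGet?_natCast]; simp
    have hg1 : PySem.List.pyGet? (pre ++ p :: c :: cs) ((pre.length : Int) + 1) = some c := by
      have h1 : ((pre.length : Int) + 1) = ((pre.length + 1 : Nat) : Int) := by push_cast; ring
      rw [h1, PySem.List.pyGet?_natCast]; simp
    have hstep : resolveYStep (pre ++ p :: c :: cs) pre.length
        = pre ++ p :: (if pyVowels.contains p && (c == 'y') then 'Y' else c) :: cs := by
      unfold resolveYStep
      rw [hg0, hg1]
      simp only [Option.getD_some, Option.some_beq_some]
      by_cases hc : pyVowels.contains p && (c == 'y')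
      · have hcy : c = 'y' := beq_iff_eq.mp ((Bool.and_eq_true _ _).mp hc).2
        rw [if_pos hc, if_pos hc,
          PySem.List.slice_to _ (by positivity), PySem.List.slice_from _ (by positivity)]
        have ht : ((pre.length : Int) + 1).toNat = pre.length + 1 := by omega
        have hd : ((pre.length : Int) + 2).toNat = pre.length + 2 := by omega
        rw [ht, hd]
        have e1 : pre ++ p :: c :: cs = (pre ++ [p]) ++ c :: cs := by simp
        have e2 : pre ++ p :: c :: cs = (pre ++ [p, c]) ++ cs := by simp
        calc List.take (pre.length + 1) (pre ++ p :: c :: cs) ++ ['Y']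
              ++ List.drop (pre.length + 2) (pre ++ p :: c :: cs)
            = ((pre ++ [p]) ++ [c] ++ cs).take ((pre ++ [p]).length) ++ ['Y']
              ++ ((pre ++ [p, c]) ++ cs).drop ((pre ++ [p, c]).length) := by
              simp
          _ = (pre ++ [p]) ++ ['Y'] ++ cs := by
              rw [List.append_assoc (pre ++ [p]), List.take_left, List.drop_left]
          _ = pre ++ p :: 'Y' :: cs := by simp
      · rw [if_neg hc, if_neg hc]
    rw [hstep]
    by_cases hc : pyVowels.contains p && (c == 'y')
    · have hcy : c = 'y' := beq_iff_eq.mp ((Bool.and_eq_true _ _).mp hc).2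
      have hp : pyVowels.contains p = true := ((Bool.and_eq_true _ _).mp hc).1
      rw [if_pos hc]
      have h1 : pre ++ p :: 'Y' :: cs = (pre ++ [p]) ++ 'Y' :: cs := by simp
      have h2 : pre.length + 1 = (pre ++ [p]).length := by simp
      rw [h1, h2, ih (pre ++ [p]) 'Y']
      have hY : pyVowels.contains 'Y' = false := by decide
      rw [hY]
      simp only [resolveYGo]
      rw [if_pos (show c = 'y' ∧ pyVowels.contains p = true from ⟨hcy, hp⟩)]
      simp
    · rw [if_neg hc]
      have h1 : pre ++ p :: c :: cs = (pre ++ [p]) ++ c :: cs := by simp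
      have h2 : pre.length + 1 = (pre ++ [p]).length := by simp
      rw [h1, h2, ih (pre ++ [p]) c]
      have hng : ¬ (c = 'y' ∧ pyVowels.contains p = true) := by
        intro ⟨h3, h4⟩
        exact hc (by rw [h4, h3]; decide)
      conv_rhs => rw [resolveYGo]
      rw [if_neg hng]
      simp

-- ===== VERDICT (by name: the statement is the Claim_ definition above) =====
theorem ResolveY_py_spec : Claim_equal_ResolveY_py := by
  intro Target _
  unfold Spec_ResolveY_py ResolveY_py ResolveY_py_alt
  cases ht : Target.toList with
  | nil =>
    simp only [List.length_nil, resolveYGo]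
    rw [String.toList_eq_nil_iff.mp ht]
    rfl
  | cons h tail =>
    simp only [List.length_cons]
    rw [if_neg (by omega)]
    by_cases hy : h = 'y'
    · rw [if_pos (by simp [hy]), PySem.List.slice_from _ (by norm_num)]
      have hd : List.drop (Int.toNat 1) (h :: tail) = tail := by simp
      rw [hd]
      have hlen : (['Y'] ++ tail).length - 1 = tail.length := by simp
      rw [hlen, List.range_eq_range']
      have hloop := resolveY_loop tail [] 'Y'
      simp only [List.length_nil, List.nil_append] at hloop
      rw [List.singleton_append, hloop]
      conv_rhs => rw [resolveYGo]
      rw [if_pos (show h = 'y' ∧ true = true from ⟨hy, rfl⟩)]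
      have hY : pyVowels.contains 'Y' = false := by decide
      rw [hY]
    · rw [if_neg (by simp [hy])]
      have hlen : (h :: tail).length - 1 = tail.length := by simp
      rw [hlen, List.range_eq_range']
      have hloop := resolveY_loop tail [] h
      simp only [List.length_nil, List.nil_append] at hloop
      rw [hloop]
      conv_rhs => rw [resolveYGo]
      rw [if_neg (by simp [hy])]
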